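-- pv_equiv track=rewrite | github.com/ifhakhyeon/hakhyeon-s_note | 파이썬/백준/백준 24732 와... 대박...py | calc
-- ===== SOURCE A (Python) =====
-- def calc(arr, n):
--     if n == 1:
--         return [1]
--
--     mod = 10 ** 9 + 7
--     ans = [0] * n
--     ans[0] = 1
--     ans[1] = min(arr[0], arr[1])
--     stack = [(ans[1], 1)]
--     for i in range(2, n):
--         x = min(arr[i - 1], arr[i])
--         y = 0
--         ans[i] = ans[i - 1] * (x + 1) % mod
--         while stack and (stack[-1][0] >= x):
--             xx, yy = stack.pop()
--             ans[i] = (ans[i] - yy * (xx - x)) % mod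
--             y += yy
--         stack.append((x, y + ans[i - 1]))
--     return ans
-- ===== SOURCE B (Python) =====
-- def calc(arr, n):
--     if n == 1:
--         return [1]
--     mod = 10 ** 9 + 7
--     x = [0] + [min(arr[k - 1], arr[k]) for k in range(1, n)]
--     ans = [1, x[1]]
--     for i in range(2, n):
--         m = x[i]
--         s = 0
--         for j in range(i, 0, -1):
--             if x[j] < m:
--                 m = x[j]
--             s = (s + ans[j - 1] * m) % mod
--         ans.append(s)
--     return ans
-- ===== Notes on version B (the rewrite author's own statement) =====
-- stated objective: alternative
-- what changed: Replaces A's amortized monotonic-stack maintenance with a direct O(n^2) evaluation of the recurrence: for each i it rescans j = i..1 keeping a running minimum of x[j..i] and accumulates ans[j-1]*min mod p; no stack, no modular subtraction.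
import Mathlib
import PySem

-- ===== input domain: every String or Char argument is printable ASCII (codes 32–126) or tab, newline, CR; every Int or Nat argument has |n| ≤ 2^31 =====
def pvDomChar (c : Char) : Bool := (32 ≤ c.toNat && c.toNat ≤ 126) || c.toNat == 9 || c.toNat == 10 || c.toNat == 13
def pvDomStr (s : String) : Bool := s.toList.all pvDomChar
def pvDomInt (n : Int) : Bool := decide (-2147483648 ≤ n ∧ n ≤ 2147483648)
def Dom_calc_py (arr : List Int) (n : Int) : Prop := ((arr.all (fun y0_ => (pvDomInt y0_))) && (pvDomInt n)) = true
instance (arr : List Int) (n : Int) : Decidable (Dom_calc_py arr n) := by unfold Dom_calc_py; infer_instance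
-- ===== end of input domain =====

-- B replaces A's monotonic-stack update with a direct nested rescan of the recurrence
-- (running minimum over x[j..i], summed mod p); same return value, no speed claim.

-- ===== PORT A =====
-- mod = 10 ** 9 + 7
def pvMod : Int := 10 ^ 9 + 7

-- the `while stack and (stack[-1][0] >= x)` loop; the stack is kept top-first (head = Python's stack[-1])
def popA (stack : List (Int × Int)) (x ansi y : Int) : List (Int × Int) × Int × Int :=
  match stack with
  | [] => ([], ansi, y)
  | (xx, yy) :: rest =>
    if x ≤ xx then popA rest x (PySem.Int.mod (ansi - yy * (xx - x)) pvMod) (y + yy)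
    else ((xx, yy) :: rest, ansi, y)

-- one iteration of `for i in range(2, n)`; st.1 is the grown prefix ans[0..i-1], ans[i] is built in r.2.1
def pvStepA (arr : List Int) (st : List Int × List (Int × Int)) (i : Int) :
    List Int × List (Int × Int) :=
  let x := min (PySem.List.pyGetD arr (i - 1) 0) (PySem.List.pyGetD arr i 0)
  let prev := PySem.List.pyGetD st.1 (i - 1) 0
  let r := popA st.2 x (PySem.Int.mod (prev * (x + 1)) pvMod) 0
  (st.1 ++ [r.2.1], (x, r.2.2 + prev) :: r.1)

def calc_py (arr : List Int) (n : Int) : List Int :=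
  if n = 1 then [1]
  else
    let a1 := min (PySem.List.pyGetD arr 0 0) (PySem.List.pyGetD arr 1 0)
    ((PySem.List.pyRange 2 n 1).foldl (pvStepA arr) ([1, a1], [(a1, 1)])).1

-- ===== PORT B =====
-- x = [0] + [min(arr[k-1], arr[k]) for k in range(1, n)]
def pvXs (arr : List Int) (n : Int) : List Int :=
  [0] ++ (PySem.List.pyRange 1 n 1).map
    (fun k => min (PySem.List.pyGetD arr (k - 1) 0) (PySem.List.pyGetD arr k 0))

-- one iteration of `for j in range(i, 0, -1)`: running minimum ms.1, running sum ms.2 mod p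
def pvStepBInner (xs ans : List Int) (ms : Int × Int) (j : Int) : Int × Int :=
  let m := if PySem.List.pyGetD xs j 0 < ms.1 then PySem.List.pyGetD xs j 0 else ms.1
  (m, PySem.Int.mod (ms.2 + PySem.List.pyGetD ans (j - 1) 0 * m) pvMod)

-- one iteration of `for i in range(2, n)`: ans.append(s)
def pvStepB (xs ans : List Int) (i : Int) : List Int :=
  let r := (PySem.List.pyRange i 0 (-1)).foldl (pvStepBInner xs ans) (PySem.List.pyGetD xs i 0, 0)
  ans ++ [r.2]

def calc_py_alt (arr : List Int) (n : Int) : List Int :=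
  if n = 1 then [1]
  else
    let xs := pvXs arr n
    (PySem.List.pyRange 2 n 1).foldl (pvStepB xs) [1, PySem.List.pyGetD xs 1 0]

-- ===== PRECONDITION & SPEC =====
-- Pre_ excludes exactly the inputs on which A raises IndexError: n ≤ 0 ([0]*n is empty, ans[0] fails)
-- and n ≥ 2 with n > len(arr) (arr[i] out of range). A is total on all remaining inputs.
def Pre_calc_py (arr : List Int) (n : Int) : Prop :=
  n = 1 ∨ (2 ≤ n ∧ n ≤ (arr.length : Int))
instance (arr : List Int) (n : Int) : Decidable (Pre_calc_py arr n) := by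
  unfold Pre_calc_py; infer_instance

def pvWitness_calc_py : List Int × Int := ([3, 1, 2, 5], 4)

def Spec_calc_py (arr : List Int) (n : Int) (out : List Int) : Prop := out = calc_py_alt arr n
instance (arr : List Int) (n : Int) (out : List Int) : Decidable (Spec_calc_py arr n out) := by
  unfold Spec_calc_py; infer_instance

-- ===== CLAIM (what is proved, stated in full; the proofs are below) =====
def Claim_equal_calc_py : Prop := ∀ (arr : List Int) (n : Int), Dom_calc_py arr n →
  Pre_calc_py arr n → Spec_calc_py arr n (calc_py arr n)

-- ===== LEMMAS AND PROOFS =====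

-- x_k = min(arr[k-1], arr[k]) on Nat indices (meaningful for 1 ≤ k < arr.length)
def pvX (arr : List Int) (k : ℕ) : Int := min (arr.getD (k - 1) 0) (arr.getD k 0)

-- pvM arr i j = min of x_j, …, x_i (for j ≤ i)
def pvM (arr : List Int) (i j : ℕ) : Int :=
  ((List.range' j (i - j)).map (pvX arr)).foldr min (pvX arr i)

-- sum_{j=1}^{i} f j
def pvS (f : ℕ → Int) (i : ℕ) : Int := ((List.range' 1 i).map f).sum

-- stack sums: weights times (value capped at t), and weights times value
def pvW (stack : List (Int × Int)) (t : Int) : Int :=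
  (stack.map (fun vw => vw.2 * min vw.1 t)).sum
def pvV (stack : List (Int × Int)) : Int := (stack.map (fun vw => vw.2 * vw.1)).sum

-- invariant after A has processed indices 2..i (i ≥ 1); ans is the shared prefix ans[0..i]
def pvInv (arr : List Int) (i : ℕ) (ans : List Int) (stack : List (Int × Int)) : Prop :=
  ans.length = i + 1 ∧
  stack.Pairwise (fun a b => b.1 < a.1) ∧
  (∀ t : Int, pvW stack t = pvS (fun j => ans.getD (j - 1) 0 * min (pvM arr i j) t) i) ∧
  pvV stack = pvS (fun j => ans.getD (j - 1) 0 * pvM arr i j) i ∧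
  Int.ModEq pvMod (ans.getD i 0) (pvS (fun j => ans.getD (j - 1) 0 * pvM arr i j) i)

lemma pvModPos : (0 : Int) < pvMod := by norm_num [pvMod]

lemma pvM_self (arr : List Int) (i : ℕ) : pvM arr i i = pvX arr i := by
  simp [pvM]

lemma pvM_step (arr : List Int) {i j : ℕ} (h : j < i) :
    pvM arr i j = min (pvX arr j) (pvM arr i (j + 1)) := by
  have h1 : i - j = (i - (j + 1)) + 1 := by omega
  rw [pvM, h1, List.range'_succ]
  simp [pvM]

lemma pvM_succ (arr : List Int) {i : ℕ} : ∀ {j : ℕ}, j ≤ i →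
    pvM arr (i + 1) j = min (pvM arr i j) (pvX arr (i + 1)) := by
  intro j hj
  induction hd : (i - j) generalizing j with
  | zero =>
    have hji : j = i := by omega
    subst hji
    rw [pvM_step arr (by omega), pvM_self, pvM_self]
  | succ d ih =>
    have hji : j < i := by omega
    rw [pvM_step arr (show j < i + 1 by omega), pvM_step arr hji,
        ih (by omega) (by omega), min_assoc]

lemma pvM_le (arr : List Int) {i : ℕ} : ∀ {j : ℕ}, j ≤ i → pvM arr i j ≤ pvX arr i := by
  intro j hj
  induction hd : (i - j) generalizing j with
  | zero =>
    have hji : j = i := by omega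
    subst hji
    rw [pvM_self]
  | succ d ih =>
    have hji : j < i := by omega
    rw [pvM_step arr hji]
    exact le_trans (min_le_right _ _) (ih (by omega) (by omega))

lemma pvEmodAdd (a b p : Int) : (a % p + b) % p = (a + b) % p := by
  rw [Int.add_emod, Int.emod_emod_of_dvd _ dvd_rfl, ← Int.add_emod]

lemma pvEmodSub (a b p : Int) : (a % p - b) % p = (a - b) % p := by
  rw [Int.sub_emod, Int.emod_emod_of_dvd _ dvd_rfl, ← Int.sub_emod]

lemma popA_spec (x : Int) (stack : List (Int × Int)) : ∀ (c y : Int),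
    popA stack x (PySem.Int.mod c pvMod) y =
      (stack.dropWhile (fun vw => decide (x ≤ vw.1)),
       PySem.Int.mod (c - ((stack.takeWhile (fun vw => decide (x ≤ vw.1))).map
          (fun vw => vw.2 * (vw.1 - x))).sum) pvMod,
       y + ((stack.takeWhile (fun vw => decide (x ≤ vw.1))).map (·.2)).sum) := by
  induction stack with
  | nil => intro c y; simp [popA]
  | cons hd rest ih =>
    intro c y
    obtain ⟨xx, yy⟩ := hd
    by_cases hx : x ≤ xx
    · have h1 : PySem.Int.mod (PySem.Int.mod c pvMod - yy * (xx - x)) pvMod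
          = PySem.Int.mod (c - yy * (xx - x)) pvMod := by
        rw [PySem.Int.mod_eq_emod_of_pos pvModPos, PySem.Int.mod_eq_emod_of_pos pvModPos,
            PySem.Int.mod_eq_emod_of_pos pvModPos, pvEmodSub]
      simp only [popA, if_pos hx, h1, ih (c - yy * (xx - x)) (y + yy)]
      simp [hx]
      constructor
      · ring_nf
      · ring
    · simp only [popA, if_neg hx]
      simp [hx]

lemma pvX_eq (arr : List Int) {k : ℕ} (h1 : 1 ≤ k) :
    min (PySem.List.pyGetD arr ((k : Int) - 1) 0) (PySem.List.pyGetD arr (k : Int) 0)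
      = pvX arr k := by
  have hc : ((k : Int) - 1) = ((k - 1 : ℕ) : Int) := by omega
  rw [hc, PySem.List.pyGetD_natCast, PySem.List.pyGetD_natCast, pvX]

lemma pvXs_getD (arr : List Int) (n : Int) {j : ℕ} (h1 : 1 ≤ j) (hj : (j : Int) < n) :
    PySem.List.pyGetD (pvXs arr n) (j : Int) 0 = pvX arr j := by
  rw [PySem.List.pyGetD_natCast, pvXs]
  rw [List.getD_append_right _ _ _ _ (by simpa using h1)]
  have hlt : j - 1 < (n - 1).toNat := by omega
  have hmap := PySem.List.pyGetD_map_pyRange_one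
    (fun k => min (PySem.List.pyGetD arr (k - 1) 0) (PySem.List.pyGetD arr k 0)) 1 n (j - 1) 0 hlt
  rw [PySem.List.pyGetD_natCast] at hmap
  simp only [List.length_singleton]
  rw [hmap]
  have hc : (1 : Int) + ((j - 1 : ℕ) : Int) = (j : Int) := by omega
  rw [hc]
  exact pvX_eq arr h1

lemma pvS_succ (f : ℕ → Int) (i : ℕ) : pvS f (i + 1) = pvS f i + f (i + 1) := by
  rw [pvS, List.range'_concat]
  simp [pvS, Nat.add_comm]

lemma pvS_congr {f g : ℕ → Int} {i : ℕ} (h : ∀ j, 1 ≤ j → j ≤ i → f j = g j) :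
    pvS f i = pvS g i := by
  unfold pvS
  congr 1
  apply List.map_congr_left
  intro a ha
  have hm := List.mem_range'_1.mp ha
  exact h a hm.1 (by omega)

lemma pvSumMulSub (x : Int) (l : List (Int × Int)) :
    (l.map (fun vw => vw.2 * (vw.1 - x))).sum
      = (l.map (fun vw => vw.2 * vw.1)).sum - (l.map (·.2)).sum * x := by
  induction l with
  | nil => simp
  | cons hd t ih =>
    simp only [List.map_cons, List.sum_cons, ih]
    ring

lemma pvW_append (a b : List (Int × Int)) (t : Int) : pvW (a ++ b) t = pvW a t + pvW b t := by
  simp [pvW]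

lemma pvV_append (a b : List (Int × Int)) : pvV (a ++ b) = pvV a + pvV b := by
  simp [pvV]

lemma pvW_const (l : List (Int × Int)) (u : Int) (h : ∀ vw ∈ l, u ≤ vw.1) :
    pvW l u = (l.map (·.2)).sum * u := by
  unfold pvW
  have hc : ∀ a ∈ l, a.2 * min a.1 u = a.2 * u := fun a ha => by
    rw [min_eq_right (h a ha)]
  rw [List.map_congr_left hc]
  exact List.sum_map_mul_right l (·.2) u

lemma pvW_min_lt (l : List (Int × Int)) (x t : Int) (h : ∀ vw ∈ l, vw.1 < x) :
    pvW l (min x t) = pvW l t := by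
  unfold pvW
  congr 1
  apply List.map_congr_left
  intro a ha
  have hlt := h a ha
  show a.2 * min a.1 (min x t) = a.2 * min a.1 t
  congr 1
  omega

lemma pvW_of_lt (l : List (Int × Int)) (x : Int) (h : ∀ vw ∈ l, vw.1 < x) :
    pvW l x = pvV l := by
  unfold pvW pvV
  congr 1
  apply List.map_congr_left
  intro a ha
  have hlt := h a ha
  show a.2 * min a.1 x = a.2 * a.1
  congr 1
  omega

lemma pvDropWhile_lt (x : Int) : ∀ (l : List (Int × Int)),
    l.Pairwise (fun a b => b.1 < a.1) →
    ∀ vw ∈ l.dropWhile (fun vw => decide (x ≤ vw.1)), vw.1 < x := by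
  intro l
  induction l with
  | nil => simp
  | cons hd t ih =>
    intro hp
    rw [List.pairwise_cons] at hp
    by_cases hx : x ≤ hd.1
    · rw [List.dropWhile_cons_of_pos (by simpa using hx)]
      exact ih hp.2
    · rw [List.dropWhile_cons_of_neg (by simpa using hx)]
      intro vw hvw
      rcases List.mem_cons.mp hvw with h | h
      · subst h; omega
      · have := hp.1 vw h
        omega

lemma pvInnerFold (arr : List Int) (n : Int) (ans : List Int) :
    ∀ (i : ℕ), 1 ≤ i → (i : Int) < n → ∀ (m s : Int),
    (PySem.List.pyRange (i : Int) 0 (-1)).foldl (pvStepBInner (pvXs arr n) ans) (m, s) =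
      (min m (pvM arr i 1),
       PySem.Int.mod (s + pvS (fun j => ans.getD (j - 1) 0 * min m (pvM arr i j)) i) pvMod) := by
  intro i
  induction i with
  | zero => omega
  | succ d ih =>
    intro h1 hn m s
    have hxsd : PySem.List.pyGetD (pvXs arr n) (((d : Int) + 1)) 0 = pvX arr (d + 1) := by
      have hc : ((d : Int) + 1) = ((d + 1 : ℕ) : Int) := by push_cast; ring
      rw [hc]
      exact pvXs_getD arr n (by omega) (by exact_mod_cast hn)
    have hcast : (((d + 1 : ℕ)) : Int) = (d : Int) + 1 := by push_cast; ring
    rw [hcast, PySem.List.pyRange_neg_one_cons (by positivity),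
        show ((d : Int) + 1 - 1) = (d : Int) by ring, List.foldl_cons]
    have hstep : pvStepBInner (pvXs arr n) ans (m, s) ((d : Int) + 1) =
        (min m (pvX arr (d + 1)),
         PySem.Int.mod (s + ans.getD d 0 * min m (pvX arr (d + 1))) pvMod) := by
      simp only [pvStepBInner, hxsd, show ((d : Int) + 1 - 1) = ((d : ℕ) : Int) by push_cast; ring,
        PySem.List.pyGetD_natCast]
      have hmin : (if pvX arr (d + 1) < m then pvX arr (d + 1) else m)
          = min m (pvX arr (d + 1)) := by omega
      rw [hmin]
    rw [hstep]
    by_cases hd0 : d = 0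
    · subst hd0
      rw [show ((0 : ℕ) : Int) = (0 : Int) by norm_num,
          PySem.List.pyRange_neg_one_eq_nil (by norm_num)]
      simp only [List.foldl_nil, Prod.mk.injEq]
      refine ⟨by rw [pvM_self], ?_⟩
      simp [pvS, List.range', pvM_self]
    · have ih' := ih (by omega) (by omega) (min m (pvX arr (d + 1)))
        (PySem.Int.mod (s + ans.getD d 0 * min m (pvX arr (d + 1))) pvMod)
      rw [ih']
      simp only [Prod.mk.injEq]
      refine ⟨?_, ?_⟩
      · rw [pvM_succ arr (by omega), min_comm (pvM arr d 1) (pvX arr (d + 1)), min_assoc]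
      · rw [PySem.Int.mod_eq_emod_of_pos pvModPos, PySem.Int.mod_eq_emod_of_pos pvModPos,
            PySem.Int.mod_eq_emod_of_pos pvModPos, pvEmodAdd]
        congr 1
        rw [pvS_succ]
        have hcg : pvS (fun j => ans.getD (j - 1) 0 * min (min m (pvX arr (d + 1))) (pvM arr d j)) d
            = pvS (fun j => ans.getD (j - 1) 0 * min m (pvM arr (d + 1) j)) d := by
          apply pvS_congr
          intro j hj1 hjd
          rw [pvM_succ arr hjd, min_comm (pvM arr d j) (pvX arr (d + 1)), ← min_assoc]
        rw [hcg, pvM_self, show d + 1 - 1 = d by omega]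
        ring

lemma pvOuterFold (arr : List Int) (n : Int) (h2 : 2 ≤ n) (_hn : n ≤ (arr.length : Int)) :
    ∀ (k : ℕ), (k : Int) + 2 ≤ n →
    ∃ ansk stackk,
      (PySem.List.pyRange 2 ((k : Int) + 2) 1).foldl (pvStepA arr)
        ([1, min (PySem.List.pyGetD arr 0 0) (PySem.List.pyGetD arr 1 0)],
         [(min (PySem.List.pyGetD arr 0 0) (PySem.List.pyGetD arr 1 0), 1)]) = (ansk, stackk)
      ∧ (PySem.List.pyRange 2 ((k : Int) + 2) 1).foldl (pvStepB (pvXs arr n))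
          [1, PySem.List.pyGetD (pvXs arr n) 1 0] = ansk
      ∧ pvInv arr (k + 1) ansk stackk := by
  have ha1 : min (PySem.List.pyGetD arr 0 0) (PySem.List.pyGetD arr 1 0) = pvX arr 1 := by
    rw [show (1 : Int) = ((1 : ℕ) : Int) by norm_num, show (0 : Int) = ((0 : ℕ) : Int) by norm_num,
        PySem.List.pyGetD_natCast, PySem.List.pyGetD_natCast, pvX]
    norm_num
  have hxs1 : PySem.List.pyGetD (pvXs arr n) 1 0 = pvX arr 1 := by
    rw [show (1 : Int) = ((1 : ℕ) : Int) by norm_num]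
    exact pvXs_getD arr n (by omega) (by push_cast; omega)
  intro k
  induction k with
  | zero =>
    intro _
    refine ⟨[1, pvX arr 1], [(pvX arr 1, 1)], ?_, ?_, ?_⟩
    · rw [show ((0 : ℕ) : Int) + 2 = 2 by norm_num, PySem.List.pyRange_one_eq_nil (by norm_num)]
      simp [ha1]
    · rw [show ((0 : ℕ) : Int) + 2 = 2 by norm_num, PySem.List.pyRange_one_eq_nil (by norm_num)]
      simp [hxs1]
    · refine ⟨by simp, by simp, ?_, ?_, ?_⟩
      · intro t
        simp [pvW, pvS, List.range', pvM_self]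
      · simp [pvV, pvS, List.range', pvM_self]
      · simp only [pvS, List.range', List.map, List.sum_cons, List.sum_nil, pvM_self]
        simp [Int.ModEq]
  | succ d ih =>
    intro hkn
    obtain ⟨ans, stack, hA, hB, hlen, hpw, hW, hV, hm5⟩ := ih (by push_cast at hkn ⊢; omega)
    have hsplit : PySem.List.pyRange 2 (((d + 1 : ℕ) : Int) + 2) 1
        = PySem.List.pyRange 2 ((d : Int) + 2) 1 ++ [(d : Int) + 2] := by
      rw [show (((d + 1 : ℕ) : Int) + 2) = ((d : Int) + 2) + 1 by push_cast; ring]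
      exact PySem.List.pyRange_one_succ_right (by omega)
    -- abbreviations (i = d+1+1 throughout, so that the +1 recursions fire)
    set x : Int := pvX arr (d + 1 + 1) with hxdef
    set prev : Int := ans.getD (d + 1) 0 with hprevdef
    set P : List (Int × Int) := stack.takeWhile (fun vw => decide (x ≤ vw.1)) with hPdef
    set K : List (Int × Int) := stack.dropWhile (fun vw => decide (x ≤ vw.1)) with hKdef
    set SW : Int := (P.map (·.2)).sum with hSWdef
    set vA : Int := PySem.Int.mod (prev * (x + 1)
        - (P.map (fun vw => vw.2 * (vw.1 - x))).sum) pvMod with hvAdef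
    have hPK : P ++ K = stack := List.takeWhile_append_dropWhile
    have hPge : ∀ vw ∈ P, x ≤ vw.1 := by
      intro vw hvw
      simpa using List.mem_takeWhile_imp hvw
    have hKlt : ∀ vw ∈ K, vw.1 < x := pvDropWhile_lt x stack hpw
    -- index bridges at i = d+2
    have hib : ((d : Int) + 2) = ((d + 1 + 1 : ℕ) : Int) := by push_cast; ring
    have hxarr : min (PySem.List.pyGetD arr ((d : Int) + 2 - 1) 0)
        (PySem.List.pyGetD arr ((d : Int) + 2) 0) = x := by
      rw [hib]; exact pvX_eq arr (by omega)
    have hprevb : PySem.List.pyGetD ans ((d : Int) + 2 - 1) 0 = prev := by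
      rw [show ((d : Int) + 2 - 1) = ((d + 1 : ℕ) : Int) by push_cast; ring,
          PySem.List.pyGetD_natCast]
    -- the A step
    have hstepA : pvStepA arr (ans, stack) ((d : Int) + 2)
        = (ans ++ [vA], (x, (0 + SW) + prev) :: K) := by
      simp only [pvStepA, hxarr, hprevb, popA_spec x stack (prev * (x + 1)) 0,
        ← hPdef, ← hKdef, ← hSWdef, ← hvAdef]
    -- the B step
    have hxsi : PySem.List.pyGetD (pvXs arr n) ((d : Int) + 2) 0 = x := by
      rw [hib]; exact pvXs_getD arr n (by omega) (by push_cast; push_cast at hkn; omega)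
    have hSall : pvS (fun j => ans.getD (j - 1) 0 * min x (pvM arr (d + 1 + 1) j)) (d + 1 + 1)
        = pvS (fun j => ans.getD (j - 1) 0 * pvM arr (d + 1 + 1) j) (d + 1 + 1) := by
      apply pvS_congr
      intro j hj1 hj2
      rw [min_eq_right (pvM_le arr (by omega))]
    have hstepB : pvStepB (pvXs arr n) ans ((d : Int) + 2)
        = ans ++ [PySem.Int.mod
            (0 + pvS (fun j => ans.getD (j - 1) 0 * pvM arr (d + 1 + 1) j) (d + 1 + 1)) pvMod] := by
      have hinner := pvInnerFold arr n ans (d + 1 + 1) (by omega)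
        (by push_cast; push_cast at hkn; omega) x 0
      rw [← hib] at hinner
      simp only [pvStepB, hxsi, hinner, hSall]
    -- key algebraic facts
    have e1 : (P.map (fun vw => vw.2 * (vw.1 - x))).sum
        = (P.map (fun vw => vw.2 * vw.1)).sum - SW * x := pvSumMulSub x P
    have e2 : pvV stack = (P.map (fun vw => vw.2 * vw.1)).sum + pvV K := by
      rw [← hPK, pvV_append]
      rfl
    have e3 : pvW stack x = SW * x + pvV K := by
      rw [← hPK, pvW_append, pvW_const P x hPge, pvW_of_lt K x hKlt, hSWdef]
    have e4 : pvS (fun j => ans.getD (j - 1) 0 * pvM arr (d + 1 + 1) j) (d + 1 + 1)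
        = pvW stack x + prev * x := by
      rw [pvS_succ]
      have hc1 : pvS (fun j => ans.getD (j - 1) 0 * pvM arr (d + 1 + 1) j) (d + 1)
          = pvS (fun j => ans.getD (j - 1) 0 * min (pvM arr (d + 1) j) x) (d + 1) := by
        apply pvS_congr
        intro j hj1 hj2
        rw [pvM_succ arr hj2]
      rw [hc1, ← hW x, pvM_self, show d + 1 + 1 - 1 = d + 1 by omega]
    have hcong : Int.ModEq pvMod prev (pvV stack) := by
      rw [hV]; exact hm5
    -- vA equals B's appended value
    have hvAB : vA = PySem.Int.mod
        (0 + pvS (fun j => ans.getD (j - 1) 0 * pvM arr (d + 1 + 1) j) (d + 1 + 1)) pvMod := by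
      rw [hvAdef, PySem.Int.mod_eq_emod_of_pos pvModPos, PySem.Int.mod_eq_emod_of_pos pvModPos]
      have hid : prev * (x + 1) - (P.map (fun vw => vw.2 * (vw.1 - x))).sum
          = (0 + pvS (fun j => ans.getD (j - 1) 0 * pvM arr (d + 1 + 1) j) (d + 1 + 1))
            + (prev - pvV stack) := by
        rw [e1, e4, e3, e2]; ring
      rw [hid]
      have h0 : Int.ModEq pvMod (prev - pvV stack) 0 := by
        have hsub := Int.ModEq.sub hcong (Int.ModEq.refl (pvV stack))
        simpa using hsub
      calc ((0 + pvS (fun j => ans.getD (j - 1) 0 * pvM arr (d + 1 + 1) j) (d + 1 + 1))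
              + (prev - pvV stack)) % pvMod
          = ((0 + pvS (fun j => ans.getD (j - 1) 0 * pvM arr (d + 1 + 1) j) (d + 1 + 1)) + 0)
              % pvMod := Int.ModEq.add (Int.ModEq.refl _) h0
        _ = (0 + pvS (fun j => ans.getD (j - 1) 0 * pvM arr (d + 1 + 1) j) (d + 1 + 1))
              % pvMod := by ring_nf
    -- assemble
    refine ⟨ans ++ [vA], (x, (0 + SW) + prev) :: K, ?_, ?_, ?_⟩
    · rw [hsplit, List.foldl_append, hA, List.foldl_cons, List.foldl_nil, hstepA]
    · rw [hsplit, List.foldl_append, hB, List.foldl_cons, List.foldl_nil, hstepB, hvAB]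
    · -- the invariant at i = d+1+1
      have hgd : ∀ jj, jj < d + 1 + 1 → (ans ++ [vA]).getD jj 0 = ans.getD jj 0 := by
        intro jj hjj
        exact List.getD_append ans [vA] 0 jj (by omega)
      have hgd2 : (ans ++ [vA]).getD (d + 1 + 1) 0 = vA := by
        rw [List.getD_append_right ans [vA] 0 (d + 1 + 1) (by omega)]
        simp [hlen]
      have hR : pvS (fun j => (ans ++ [vA]).getD (j - 1) 0 * pvM arr (d + 1 + 1) j) (d + 1 + 1)
          = pvS (fun j => ans.getD (j - 1) 0 * pvM arr (d + 1 + 1) j) (d + 1 + 1) := by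
        apply pvS_congr
        intro j hj1 hj2
        rw [hgd (j - 1) (by omega)]
      refine ⟨by simp [hlen], ?_, ?_, ?_, ?_⟩
      · rw [List.pairwise_cons]
        exact ⟨fun vw hvw => hKlt vw hvw, List.Pairwise.sublist (List.dropWhile_sublist _) hpw⟩
      · -- capped sums at every t
        intro t
        have hL : pvW ((x, (0 + SW) + prev) :: K) t = ((0 + SW) + prev) * min x t + pvW K t := by
          simp [pvW]
        rw [hL]
        have hRt : pvS (fun j => (ans ++ [vA]).getD (j - 1) 0 * min (pvM arr (d + 1 + 1) j) t)
              (d + 1 + 1)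
            = pvS (fun j => ans.getD (j - 1) 0 * min (pvM arr (d + 1) j) (min x t)) (d + 1)
              + prev * min x t := by
          rw [pvS_succ]
          congr 1
          · apply pvS_congr
            intro j hj1 hj2
            rw [hgd (j - 1) (by omega), pvM_succ arr hj2, min_assoc]
          · rw [hgd (d + 1 + 1 - 1) (by omega), show d + 1 + 1 - 1 = d + 1 by omega, pvM_self]
        rw [hRt, ← hW (min x t), ← hPK, pvW_append,
            pvW_const P (min x t) (fun vw hvw => le_trans (min_le_left x t) (hPge vw hvw)),
            pvW_min_lt K x t hKlt, hSWdef]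
        ring
      · -- exact sums
        have hL : pvV ((x, (0 + SW) + prev) :: K) = ((0 + SW) + prev) * x + pvV K := by
          simp [pvV]
        rw [hL, hR, e4, e3]
        ring
      · -- congruence for the last entry
        rw [hgd2, hR, hvAB, PySem.Int.mod_eq_emod_of_pos pvModPos]
        have hmm : Int.ModEq pvMod
            ((0 + pvS (fun j => ans.getD (j - 1) 0 * pvM arr (d + 1 + 1) j) (d + 1 + 1)) % pvMod)
            (0 + pvS (fun j => ans.getD (j - 1) 0 * pvM arr (d + 1 + 1) j) (d + 1 + 1)) :=
          Int.emod_emod_of_dvd _ dvd_rfl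
        simpa using hmm

-- ===== VERDICT (by name: the statement is the Claim_ definition above) =====
theorem calc_py_spec : Claim_equal_calc_py := by
  intro arr n _ hpre
  unfold Spec_calc_py
  rcases hpre with h1 | ⟨h2, hn⟩
  · subst h1
    simp [calc_py, calc_py_alt]
  · have hne : ¬ (n = 1) := by omega
    obtain ⟨k, hk⟩ : ∃ k : ℕ, n = (k : Int) + 2 := ⟨(n - 2).toNat, by omega⟩
    obtain ⟨ansk, stackk, hA, hB, _⟩ := pvOuterFold arr n h2 hn k (by omega)
    rw [← hk] at hA hB
    simp only [calc_py, calc_py_alt, if_neg hne]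
    rw [hA, hB]
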